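-- pv_equiv track=rewrite | github.com/kartic03/DBS-Candidacy-Screening | xai/lime_analysis.py | extract_lime_feature_name
-- ===== SOURCE A (Python) =====
-- from typing import Dict, List, Optional, Tuple
--
-- def extract_lime_feature_name(desc: str, feature_names: List[str]) -> Optional[str]:
--     """Extract the raw feature name from a LIME feature description string.
--
--     LIME descriptions look like: 'updrs_iii_total > 0.50' or 'age <= -0.23'.
--     We match the longest feature name that appears as a prefix.
--     """
--     # Sort by length descending so we match the longest prefix first
--     for fname in sorted(feature_names, key=len, reverse=True):
--         if desc.startswith(fname):
--             return fname
--     # Fallback: try partial match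
--     for fname in sorted(feature_names, key=len, reverse=True):
--         if fname in desc:
--             return fname
--     return desc.split(" ")[0]  # best guess: first token
-- ===== SOURCE B (Python) =====
-- from typing import List, Optional
--
-- def extract_lime_feature_name(desc: str, feature_names: List[str]) -> Optional[str]:
--     # Single linear scan keeping the longest matching name (first on ties),
--     # instead of sorting the list by length for each pass.
--     best = None
--     for fname in feature_names:
--         if desc.startswith(fname) and (best is None or len(fname) > len(best)):
--             best = fname
--     if best is None:
--         for fname in feature_names:
--             if fname in desc and (best is None or len(fname) > len(best)):
--                 best = fname
--     if best is not None:
--         return best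
--     return desc.split(" ")[0]
-- ===== Notes on version B (the rewrite author's own statement) =====
-- stated objective: simpler
-- what changed: Replaces A's two sorted(feature_names, key=len, reverse=True) passes followed by first-match scans with plain linear scans over the list in original order that keep the longest matching name (strict > preserves the stable-sort tie order), sorting nothing.
import Mathlib
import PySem

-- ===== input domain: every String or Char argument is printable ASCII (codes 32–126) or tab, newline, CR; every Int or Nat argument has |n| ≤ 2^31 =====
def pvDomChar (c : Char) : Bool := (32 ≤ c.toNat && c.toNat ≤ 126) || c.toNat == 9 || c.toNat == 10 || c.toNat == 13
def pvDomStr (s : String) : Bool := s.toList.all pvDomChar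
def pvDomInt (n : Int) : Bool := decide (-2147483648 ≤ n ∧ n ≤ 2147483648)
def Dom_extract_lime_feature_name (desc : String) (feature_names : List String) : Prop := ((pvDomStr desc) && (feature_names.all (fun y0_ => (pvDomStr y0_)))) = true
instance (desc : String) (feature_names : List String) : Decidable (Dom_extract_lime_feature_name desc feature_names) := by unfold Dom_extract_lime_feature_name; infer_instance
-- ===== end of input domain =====

-- B replaces A's two sort-by-length passes with single linear scans keeping the longest match (simpler, no sorting).


-- ===== PORT A =====
-- A: sort by length descending (stable), return first prefix match; else first
-- substring match on the same sorted order; else desc.split(" ")[0].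
def extract_lime_feature_name (desc : String) (feature_names : List String) : Option String :=
  match (PySem.List.sorted feature_names PySem.Str.len true).find?
          (fun fname => PySem.Str.startswith desc fname) with
  | some fname => some fname
  | none =>
    match (PySem.List.sorted feature_names PySem.Str.len true).find?
            (fun fname => PySem.Str.isIn fname desc) with
    | some fname => some fname
    | none => PySem.List.pyGet? ((PySem.Str.split? desc " ").getD []) 0

-- ===== PORT B =====
-- Source B's best-update: take fname iff it matches and is strictly longer than the current best.
def pvBestUpd (p : String → Bool) (best : Option String) (fname : String) : Option String :=
  if p fname && (match best with
                 | none => true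
                 | some b => decide (PySem.Str.len b < PySem.Str.len fname)) then some fname else best

def extract_lime_feature_name_alt (desc : String) (feature_names : List String) : Option String :=
  let b1 := feature_names.foldl (pvBestUpd (fun fname => PySem.Str.startswith desc fname)) none
  let b2 := match b1 with
            | none => feature_names.foldl (pvBestUpd (fun fname => PySem.Str.isIn fname desc)) none
            | some b => some b
  match b2 with
  | some b => some b
  | none => PySem.List.pyGet? ((PySem.Str.split? desc " ").getD []) 0

-- ===== PRECONDITION & SPEC =====
def Spec_extract_lime_feature_name (desc : String) (feature_names : List String) (out : Option String) : Prop := out = extract_lime_feature_name_alt desc feature_names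
instance (desc : String) (feature_names : List String) (out : Option String) : Decidable (Spec_extract_lime_feature_name desc feature_names out) := by unfold Spec_extract_lime_feature_name; infer_instance

-- ===== CLAIM (what is proved, stated in full; the proofs are below) =====
def Claim_equal_extract_lime_feature_name : Prop := ∀ (desc : String) (feature_names : List String), Dom_extract_lime_feature_name desc feature_names → Spec_extract_lime_feature_name desc feature_names (extract_lime_feature_name desc feature_names)

-- ===== LEMMAS AND PROOFS =====

-- One insertion into a reverse-length-sorted list commutes with one best-update step.
theorem find?_insertBy_eq_upd (p : String → Bool) (x : String) (ys : List String)
    (hs : ys.Pairwise (fun a b => PySem.Str.len b ≤ PySem.Str.len a)) :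
    (PySem.List.insertBy (fun a b => decide (PySem.Str.len b < PySem.Str.len a)) x ys).find? p
      = pvBestUpd p (ys.find? p) x := by
  induction ys with
  | nil =>
    by_cases hx : p x <;> simp [PySem.List.insertBy, pvBestUpd, hx]
  | cons y ys ih =>
    have h1 : ∀ z ∈ ys, PySem.Str.len z ≤ PySem.Str.len y := (List.pairwise_cons.mp hs).1
    have h2 := (List.pairwise_cons.mp hs).2
    by_cases hlt : PySem.Str.len y < PySem.Str.len x
    · -- x goes in front of y
      have hltn : y.length < x.length := by
        simp [PySem.Str.len_eq] at hlt; exact_mod_cast hlt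
      have hins : PySem.List.insertBy (fun a b => decide (PySem.Str.len b < PySem.Str.len a)) x (y :: ys)
          = x :: y :: ys := by
        simp [PySem.List.insertBy, PySem.Str.len_eq]
        omega
      rw [hins]
      by_cases hx : p x
      · have lhs : (x :: y :: ys).find? p = some x := by simp [List.find?, hx]
        rw [lhs]
        rcases hfy : (y :: ys).find? p with _ | b
        · simp [pvBestUpd, hx]
        · have hb : b ∈ y :: ys := List.mem_of_find?_eq_some hfy
          have hble : PySem.Str.len b ≤ PySem.Str.len y := by
            rcases List.mem_cons.mp hb with h | h
            · simp [h]
            · exact h1 b h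
          have hbl : b.length < x.length := by
            have := lt_of_le_of_lt hble hlt
            simp [PySem.Str.len_eq] at this; exact_mod_cast this
          simp [pvBestUpd, hx, hbl]
      · have lhs : (x :: y :: ys).find? p = (y :: ys).find? p := by simp [List.find?, hx]
        rw [lhs]; simp [pvBestUpd, hx]
    · -- x goes after y
      have hltn : x.length ≤ y.length := by
        simp [PySem.Str.len_eq] at hlt; exact_mod_cast hlt
      have hins : PySem.List.insertBy (fun a b => decide (PySem.Str.len b < PySem.Str.len a)) x (y :: ys)
          = y :: PySem.List.insertBy (fun a b => decide (PySem.Str.len b < PySem.Str.len a)) x ys := by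
        simp [PySem.List.insertBy, PySem.Str.len_eq]
        omega
      rw [hins]
      by_cases hy : p y
      · have hylt : ¬ y.length < x.length := by omega
        simp [List.find?, hy, pvBestUpd, hylt]
      · simp only [List.find?, hy]
        exact ih h2

-- First match in the stable length-descending sort = linear longest-match scan.
theorem find?_sorted_eq_foldl (p : String → Bool) (xs : List String) :
    (PySem.List.sorted xs PySem.Str.len true).find? p = xs.foldl (pvBestUpd p) none := by
  induction xs using List.reverseRecOn with
  | nil => simp [PySem.List.sorted_rev_eq_foldl_insertBy]
  | append_singleton xs x ih =>
    have hsort : PySem.List.sorted (xs ++ [x]) PySem.Str.len true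
        = PySem.List.insertBy (fun a b => decide (PySem.Str.len b < PySem.Str.len a)) x
            (PySem.List.sorted xs PySem.Str.len true) := by
      rw [PySem.List.sorted_rev_eq_foldl_insertBy, PySem.List.sorted_rev_eq_foldl_insertBy,
        List.foldl_append]
      simp
    rw [hsort, List.foldl_append,
      find?_insertBy_eq_upd p x _ (PySem.List.sorted_pairwise_rev xs PySem.Str.len), ih]
    simp

-- ===== VERDICT (by name: the statement is the Claim_ definition above) =====
theorem extract_lime_feature_name_spec : Claim_equal_extract_lime_feature_name := by
  intro desc feature_names _
  unfold Spec_extract_lime_feature_name extract_lime_feature_name extract_lime_feature_name_alt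
  rw [find?_sorted_eq_foldl, find?_sorted_eq_foldl]
  rcases h1 : feature_names.foldl (pvBestUpd (fun fname => PySem.Str.startswith desc fname)) none with _ | b
  · rcases h2 : feature_names.foldl (pvBestUpd (fun fname => PySem.Str.isIn fname desc)) none with _ | c <;> simp
  · simp
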